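-- pv_equiv track=rewrite | github.com/antonrmolina/nucleus-distribution-pages | scripts/parse_protocol.py | extract_protocol_section
-- ===== SOURCE A (Python) =====
-- def extract_protocol_section(content):
--     """Extract everything under the '# Protocol' heading."""
--     lines = content.split('\n')
--     protocol_lines = []
--     in_protocol = False
--
--     for line in lines:
--         # Check if we've reached the Protocol heading
--         if line.strip() == '# Protocol':
--             in_protocol = True
--             protocol_lines.append(line)
--             continue
--
--         # Stop if we hit another level 1 heading
--         if in_protocol and line.startswith('# ') and line.strip() != '# Protocol':
--             break
--
--         # Collect lines if we're in the Protocol section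
--         if in_protocol:
--             protocol_lines.append(line)
--
--     return '\n'.join(protocol_lines)
-- ===== SOURCE B (Python) =====
-- def extract_protocol_section(content):
--     """Extract everything under the '# Protocol' heading."""
--     lines = content.split('\n')
--     start = 0
--     while start < len(lines) and lines[start].strip() != '# Protocol':
--         start += 1
--     if start == len(lines):
--         return ''
--     end = start + 1
--     while end < len(lines) and not (lines[end].startswith('# ') and lines[end].strip() != '# Protocol'):
--         end += 1
--     return '\n'.join(lines[start:end])
-- ===== Notes on version B (the rewrite author's own statement) =====
-- stated objective: alternative
-- what changed: A's single flag-and-accumulator pass is replaced by computing the section's start and end line indices with two bounded scans and returning one slice join of lines[start:end].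
import Mathlib
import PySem

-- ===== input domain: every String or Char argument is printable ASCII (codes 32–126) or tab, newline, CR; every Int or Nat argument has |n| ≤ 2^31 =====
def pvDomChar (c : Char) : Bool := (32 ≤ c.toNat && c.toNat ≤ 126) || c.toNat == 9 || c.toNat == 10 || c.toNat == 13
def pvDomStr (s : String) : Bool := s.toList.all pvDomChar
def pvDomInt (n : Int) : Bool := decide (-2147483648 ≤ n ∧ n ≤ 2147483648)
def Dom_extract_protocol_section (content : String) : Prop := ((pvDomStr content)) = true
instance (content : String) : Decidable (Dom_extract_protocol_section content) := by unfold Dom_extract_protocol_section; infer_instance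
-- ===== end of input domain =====

-- B replaces A's flag-and-accumulator scan by computing the section's start and end
-- line indices and slicing once (objective: alternative decomposition; same cost).

-- ===== PORT A =====
-- the for-loop with its (protocol_lines, in_protocol) state; returning acc = Python's break
def loopA : List String → List String → Bool → List String
  | [], acc, _ => acc
  | l :: ls, acc, inp =>
    if PySem.Str.strip l == "# Protocol" then loopA ls (acc ++ [l]) true
    else if inp && PySem.Str.startswith l "# " && !(PySem.Str.strip l == "# Protocol") then acc
    else if inp then loopA ls (acc ++ [l]) inp
    else loopA ls acc inp

-- content.split('\n'): the separator is the non-empty literal "\n", so split? is always `some`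
def extract_protocol_section (content : String) : String :=
  PySem.Str.join "\n" (loopA ((PySem.Str.split? content "\n").getD []) [] false)

-- ===== PORT B =====
-- first while loop: advance start while the line is not the heading
-- (lines[start] is read with getD: the loop guard keeps the index in range, so this is exact)
def findStartB (lines : List String) (start : Nat) : Nat :=
  if h : start < lines.length then
    if PySem.Str.strip (lines.getD start "") == "# Protocol" then start
    else findStartB lines (start + 1)
  else start
termination_by lines.length - start

-- second while loop: advance end while the line is not a terminating level-1 heading
def findEndB (lines : List String) (e : Nat) : Nat :=
  if h : e < lines.length then
    if PySem.Str.startswith (lines.getD e "") "# " &&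
        !(PySem.Str.strip (lines.getD e "") == "# Protocol") then e
    else findEndB lines (e + 1)
  else e
termination_by lines.length - e

-- boundary computation + slice on the split line list
def sectionSliceB (lines : List String) : String :=
  if findStartB lines 0 == lines.length then ""
  else PySem.Str.join "\n"
    (PySem.List.slice lines (some ((findStartB lines 0 : Nat) : Int))
      (some ((findEndB lines (findStartB lines 0 + 1) : Nat) : Int)))

def extract_protocol_section_alt (content : String) : String :=
  sectionSliceB ((PySem.Str.split? content "\n").getD [])

-- ===== PRECONDITION & SPEC =====
def Spec_extract_protocol_section (content : String) (out : String) : Prop := out = extract_protocol_section_alt content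
instance (content : String) (out : String) : Decidable (Spec_extract_protocol_section content out) := by unfold Spec_extract_protocol_section; infer_instance

-- ===== CLAIM (what is proved, stated in full; the proofs are below) =====
def Claim_equal_extract_protocol_section : Prop := ∀ (content : String), Dom_extract_protocol_section content → Spec_extract_protocol_section content (extract_protocol_section content)

-- ===== LEMMAS AND PROOFS =====

-- the two line predicates: P = "is the '# Protocol' heading", T = "terminating level-1 heading"
def pvP (l : String) : Bool := PySem.Str.strip l == "# Protocol"
def pvT (l : String) : Bool := PySem.Str.startswith l "# " && !(PySem.Str.strip l == "# Protocol")

-- common value both programs compute, phrased over the line list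
def pvCommon (lines : List String) : List String :=
  match lines.dropWhile (fun l => !pvP l) with
  | [] => []
  | l :: rest => l :: rest.takeWhile (fun l => !pvT l)

theorem loopA_true (ls : List String) : ∀ acc,
    loopA ls acc true = acc ++ ls.takeWhile (fun l => !pvT l) := by
  induction ls with
  | nil => intro acc; simp [loopA]
  | cons l ls ih =>
    intro acc
    by_cases hP : PySem.Str.strip l = "# Protocol"
    · simp [loopA, hP, pvT, ih]
    · by_cases hS : PySem.Chars.startswith l.toList ['#', ' '] = true
      · simp [loopA, hP, hS, pvT]
      · simp [loopA, hP, hS, pvT, ih]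

theorem loopA_false (ls : List String) :
    loopA ls [] false = pvCommon ls := by
  induction ls with
  | nil => simp [loopA, pvCommon]
  | cons l ls ih =>
    by_cases hP : PySem.Str.strip l = "# Protocol"
    · simp [loopA, hP, pvCommon, pvP, loopA_true]
    · simp [loopA, hP, pvCommon, pvP] at ih ⊢
      exact ih

theorem getD_append_len {α : Type} (pre suf : List α) (l : α) (d : α) :
    (pre ++ l :: suf).getD pre.length d = l := by
  simp [List.getD]

theorem findStartB_spec (suf : List String) : ∀ pre : List String,
    findStartB (pre ++ suf) pre.length =
      pre.length + (suf.takeWhile (fun l => !pvP l)).length := by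
  induction suf with
  | nil => intro pre; unfold findStartB; simp
  | cons l ls ih =>
    intro pre
    unfold findStartB
    have hlt : pre.length < (pre ++ l :: ls).length := by simp
    rw [dif_pos hlt, getD_append_len]
    by_cases hP : PySem.Str.strip l = "# Protocol"
    · simp [hP, pvP]
    · have := ih (pre ++ [l])
      simp only [List.append_assoc, List.cons_append, List.nil_append,
        List.length_append, List.length_cons, List.length_nil] at this
      simp [hP, pvP, this]
      omega

theorem findEndB_spec (suf : List String) : ∀ pre : List String,
    findEndB (pre ++ suf) pre.length =
      pre.length + (suf.takeWhile (fun l => !pvT l)).length := by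
  induction suf with
  | nil => intro pre; unfold findEndB; simp
  | cons l ls ih =>
    intro pre
    unfold findEndB
    have hlt : pre.length < (pre ++ l :: ls).length := by simp
    rw [dif_pos hlt, getD_append_len]
    have ihs := ih (pre ++ [l])
    simp only [List.append_assoc, List.cons_append, List.nil_append,
      List.length_append, List.length_cons, List.length_nil] at ihs
    by_cases hS : PySem.Chars.startswith l.toList ['#', ' '] = true
    · by_cases hP : PySem.Str.strip l = "# Protocol"
      · simp [hS, hP, pvT, ihs]; omega
      · simp [hS, hP, pvT]
    · simp [hS, pvT, ihs]; omega

theorem main_eq (lines : List String) :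
    PySem.Str.join "\n" (loopA lines [] false) = sectionSliceB lines := by
  rw [loopA_false]
  unfold sectionSliceB
  have hsplit : lines = lines.takeWhile (fun l => !pvP l) ++ lines.dropWhile (fun l => !pvP l) :=
    (List.takeWhile_append_dropWhile).symm
  have hstart : findStartB lines 0 = (lines.takeWhile (fun l => !pvP l)).length := by
    simpa using findStartB_spec lines []
  cases hd : lines.dropWhile (fun l => !pvP l) with
  | nil =>
    have hlen : (lines.takeWhile (fun l => !pvP l)).length = lines.length := by
      conv_rhs => rw [hsplit]
      simp [hd]
    rw [hstart, hlen]
    simp [pvCommon, hd, PySem.Str.join, PySem.Chars.join]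
    decide
  | cons l rest =>
    have hlineseq : lines = lines.takeWhile (fun l => !pvP l) ++ l :: rest := by
      rw [hd] at hsplit; exact hsplit
    have hlen : (lines.takeWhile (fun l => !pvP l)).length < lines.length := by
      conv_rhs => rw [hlineseq]
      simp
    rw [hstart, if_neg (by simp only [beq_iff_eq]; omega)]
    have hend : findEndB lines ((lines.takeWhile (fun l => !pvP l)).length + 1) =
        (lines.takeWhile (fun l => !pvP l)).length + 1 + (rest.takeWhile (fun l => !pvT l)).length := by
      have := findEndB_spec rest (lines.takeWhile (fun l => !pvP l) ++ [l])
      simp only [List.append_assoc, List.cons_append, List.nil_append,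
        List.length_append, List.length_cons, List.length_nil] at this
      rw [← hlineseq] at this
      rw [this]
    rw [hend, PySem.List.slice_natCast]
    have hdrop : lines.drop (lines.takeWhile (fun l => !pvP l)).length = l :: rest := by
      calc lines.drop (lines.takeWhile (fun l => !pvP l)).length
            = ((lines.takeWhile (fun l => !pvP l)) ++ l :: rest).drop
                (lines.takeWhile (fun l => !pvP l)).length := by rw [← hlineseq]
        _ = l :: rest := List.drop_left
    rw [hdrop]
    have h1 : (lines.takeWhile (fun l => !pvP l)).length + 1 +
        (rest.takeWhile (fun l => !pvT l)).length - (lines.takeWhile (fun l => !pvP l)).length =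
        (rest.takeWhile (fun l => !pvT l)).length + 1 := by omega
    rw [h1, List.take_succ_cons]
    have h2 : rest.take (rest.takeWhile (fun l => !pvT l)).length = rest.takeWhile (fun l => !pvT l) :=
      (List.prefix_iff_eq_take.mp (List.takeWhile_prefix _)).symm
    rw [h2]
    simp [pvCommon, hd]

-- ===== VERDICT (by name: the statement is the Claim_ definition above) =====
theorem extract_protocol_section_spec : Claim_equal_extract_protocol_section := by
  intro content _
  unfold Spec_extract_protocol_section extract_protocol_section extract_protocol_section_alt
  exact main_eq _
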